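-- pv_equiv track=rewrite | github.com/pietro-nardelli/CryptoComparator | datasets_similarity.py | index_of_first_of_the_year
-- ===== SOURCE A (Python) =====
-- def index_of_first_of_the_year(date_input_list_of_cryptos):
--     date_indexes_list = []
--     for j in range(len(date_input_list_of_cryptos)):
--         date_index = {'2017': 0, '2016': 0, '2015': 0}
--         for i,d in enumerate(date_input_list_of_cryptos[j]):
--             if (d[0:2]=='01' and d[3:5]=='01' and d[6:] == '2017' and date_index['2017']==0):
--                 date_index['2017'] = i
--             elif (d[0:2]=='01' and d[3:5]=='01' and d[6:] == '2016' and date_index['2016']==0):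
--                 date_index['2016'] = i
--             elif (d[0:2]=='01' and d[3:5]=='01' and d[6:] == '2015' and date_index['2015']==0):
--                 date_index['2015'] = i
--         date_indexes_list.append(date_index)
--     return date_indexes_list
-- ===== SOURCE B (Python) =====
-- YEARS = ('2017', '2016', '2015')
--
--
-- def _is_jan_first(d, year):
--     return d[0:2] == '01' and d[3:5] == '01' and d[6:] == year
--
--
-- def index_of_first_of_the_year(date_input_list_of_cryptos):
--     result = []
--     for dates in date_input_list_of_cryptos:
--         result.append({
--             year: next((i for i, d in enumerate(dates) if _is_jan_first(d, year)), 0)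
--             for year in YEARS
--         })
--     return result
-- ===== Notes on version B (the rewrite author's own statement) =====
-- stated objective: idiomatic
-- what changed: B replaces A's single stateful pass that mutates a three-key dict via an if/elif chain with three independent first-match scans (next over enumerate, default 0), one per year, assembled by a dict comprehension.
-- intended difference: On a crypto whose date list starts with 01-01-Y at index 0 and contains another 01-01-Y later, A returns the later index (its ==0 guard cannot distinguish 'found at 0' from 'not found') while B returns 0, the genuine first occurrence, which is what the function's name promises. — e.g. on index_of_first_of_the_year([["01-01-2017", "01-01-2017"]]): A returns [[("2017", 1), ("2016", 0), ("2015", 0)]], B returns [[("2017", 0), ("2016", 0), ("2015", 0)]]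
import Mathlib
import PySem

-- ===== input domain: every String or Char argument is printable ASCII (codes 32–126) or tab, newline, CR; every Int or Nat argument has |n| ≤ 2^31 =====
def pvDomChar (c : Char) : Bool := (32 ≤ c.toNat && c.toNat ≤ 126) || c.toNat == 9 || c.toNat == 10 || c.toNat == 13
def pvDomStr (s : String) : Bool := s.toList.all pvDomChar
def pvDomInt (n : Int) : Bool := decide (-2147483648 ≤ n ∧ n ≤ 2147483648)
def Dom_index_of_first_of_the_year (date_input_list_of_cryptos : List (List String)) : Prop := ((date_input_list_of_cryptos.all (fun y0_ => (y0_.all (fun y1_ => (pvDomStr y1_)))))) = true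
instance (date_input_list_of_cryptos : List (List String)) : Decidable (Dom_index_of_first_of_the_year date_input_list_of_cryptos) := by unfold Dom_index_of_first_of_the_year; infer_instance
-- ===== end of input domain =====

-- B replaces A's single stateful pass (three-key dict mutated by an if/elif chain) with three
-- independent first-match scans, one per year; on lists whose index-0 date is Jan 1 of a year that
-- recurs later, A returns the later index and B returns 0, the intended first occurrence (see D_).


-- ===== PORT A =====
-- literal transliteration of A; date_index['y'] is read with getD (the three keys are always present)
def index_of_first_of_the_year (date_input_list_of_cryptos : List (List String)) : List (List (String × Int)) :=
  (PySem.List.pyRange 0 (date_input_list_of_cryptos.length : Int) 1).foldl (fun date_indexes_list j =>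
    let dates : List String := PySem.List.pyGetD date_input_list_of_cryptos j []
    let date_index : PySem.Dict String Int :=
      ((PySem.Dict.empty.insert "2017" 0).insert "2016" 0).insert "2015" 0
    let date_index := (PySem.List.enumerate dates 0).foldl (fun di p =>
      if PySem.Str.slice p.2 (some 0) (some 2) == "01" && PySem.Str.slice p.2 (some 3) (some 5) == "01"
          && PySem.Str.slice p.2 (some 6) none == "2017" && di.getD "2017" 0 == 0 then
        di.insert "2017" p.1
      else if PySem.Str.slice p.2 (some 0) (some 2) == "01" && PySem.Str.slice p.2 (some 3) (some 5) == "01"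
          && PySem.Str.slice p.2 (some 6) none == "2016" && di.getD "2016" 0 == 0 then
        di.insert "2016" p.1
      else if PySem.Str.slice p.2 (some 0) (some 2) == "01" && PySem.Str.slice p.2 (some 3) (some 5) == "01"
          && PySem.Str.slice p.2 (some 6) none == "2015" && di.getD "2015" 0 == 0 then
        di.insert "2015" p.1
      else di) date_index
    date_indexes_list ++ [date_index.items]) []

-- ===== PORT B =====
def pvIsJanFirst (d year : String) : Bool :=
  PySem.Str.slice d (some 0) (some 2) == "01" && PySem.Str.slice d (some 3) (some 5) == "01"
    && PySem.Str.slice d (some 6) none == year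

def index_of_first_of_the_year_alt (date_input_list_of_cryptos : List (List String)) : List (List (String × Int)) :=
  date_input_list_of_cryptos.foldl (fun result dates =>
    result ++ [((["2017", "2016", "2015"].foldl (fun di year =>
        di.insert year
          ((((PySem.List.enumerate dates 0).find? (fun p => pvIsJanFirst p.2 year)).map (fun p => p.1)).getD 0))
      PySem.Dict.empty)).items]) []

-- ===== PRECONDITION & SPEC =====
-- On a date list starting with '01-01-Y' that contains another '01-01-Y' later, A returns the later
-- index (its ==0 guard cannot tell 'found at 0' from 'not found') while B returns 0, the genuine
-- first occurrence, which is the intended value.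
def pvDMatch (d year : String) : Bool :=
  decide (['0', '1'] <+: d.toList ∧ ['0', '1'] <+: d.toList.drop 3 ∧ d.toList.drop 6 = year.toList)

def D_index_of_first_of_the_year (date_input_list_of_cryptos : List (List String)) : Prop :=
  ∃ dates ∈ date_input_list_of_cryptos, ∃ year ∈ ["2017", "2016", "2015"],
    (dates.head?.any (pvDMatch · year) && dates.tail.any (pvDMatch · year)) = true
instance (date_input_list_of_cryptos : List (List String)) : Decidable (D_index_of_first_of_the_year date_input_list_of_cryptos) := by unfold D_index_of_first_of_the_year; infer_instance

def Spec_index_of_first_of_the_year (date_input_list_of_cryptos : List (List String)) (out : List (List (String × Int))) : Prop := ¬ D_index_of_first_of_the_year date_input_list_of_cryptos → out = index_of_first_of_the_year_alt date_input_list_of_cryptos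
instance (date_input_list_of_cryptos : List (List String)) (out : List (List (String × Int))) : Decidable (Spec_index_of_first_of_the_year date_input_list_of_cryptos out) := by unfold Spec_index_of_first_of_the_year; infer_instance

def pvDiffWitness_index_of_first_of_the_year : List (List String) := [["01-01-2017", "01-01-2017"]]
def pvDiffWitnessOut_index_of_first_of_the_year : (List (List (String × Int))) × (List (List (String × Int))) :=
  ([[("2017", 1), ("2016", 0), ("2015", 0)]], [[("2017", 0), ("2016", 0), ("2015", 0)]])

-- ===== CLAIM (what is proved, stated in full; the proofs are below) =====
def Claim_unchanged_index_of_first_of_the_year : Prop := ∀ (date_input_list_of_cryptos : List (List String)), Dom_index_of_first_of_the_year date_input_list_of_cryptos → Spec_index_of_first_of_the_year date_input_list_of_cryptos (index_of_first_of_the_year date_input_list_of_cryptos)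
def Claim_changed_index_of_first_of_the_year : Prop := Dom_index_of_first_of_the_year (pvDiffWitness_index_of_first_of_the_year) ∧ D_index_of_first_of_the_year (pvDiffWitness_index_of_first_of_the_year) ∧ index_of_first_of_the_year (pvDiffWitness_index_of_first_of_the_year) = pvDiffWitnessOut_index_of_first_of_the_year.1 ∧ index_of_first_of_the_year_alt (pvDiffWitness_index_of_first_of_the_year) = pvDiffWitnessOut_index_of_first_of_the_year.2 ∧ pvDiffWitnessOut_index_of_first_of_the_year.1 ≠ pvDiffWitnessOut_index_of_first_of_the_year.2
def Claim_exact_index_of_first_of_the_year : Prop := ∀ (date_input_list_of_cryptos : List (List String)), Dom_index_of_first_of_the_year date_input_list_of_cryptos → D_index_of_first_of_the_year date_input_list_of_cryptos → index_of_first_of_the_year date_input_list_of_cryptos ≠ index_of_first_of_the_year_alt date_input_list_of_cryptos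

-- ===== LEMMAS AND PROOFS =====

theorem ofList_beq (l : List Char) (y : String) : (String.ofList l == y) = decide (l = y.toList) := by
  by_cases h : l = y.toList
  · simp [h]
  · have h2 : String.ofList l ≠ y := fun he => h (by rw [← he]; simp)
    simp [h, h2]

-- the D_-side match predicate coincides with the ports' slice test
theorem pvDMatch_eq (d year : String) : pvDMatch d year = pvIsJanFirst d year := by
  unfold pvDMatch pvIsJanFirst
  simp only [List.prefix_iff_eq_take, List.length_cons, List.length_nil]
  simp only [PySem.Str.slice, PySem.Chars.slice_eq_listSlice]
  rw [show ((2:Int)) = ((2:Nat):Int) by norm_num]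
  rw [show ((3:Int)) = ((3:Nat):Int) by norm_num, show ((5:Int)) = ((5:Nat):Int) by norm_num]
  rw [show ((6:Int)) = ((6:Nat):Int) by norm_num]
  rw [PySem.List.slice_natCast, PySem.List.slice_from_natCast]
  simp only [PySem.List.slice_zero_start, PySem.List.slice_to_natCast]
  have h01 : "01".toList = ['0','1'] := rfl
  rw [ofList_beq, ofList_beq, ofList_beq, h01]
  norm_num [Bool.and_assoc, eq_comm]

-- a date string matches at most one year
theorem pvIsJanFirst_excl {d y1 y2 : String} (h1 : pvIsJanFirst d y1 = true) (h2 : pvIsJanFirst d y2 = true) : y1 = y2 := by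
  rw [← pvDMatch_eq] at h1 h2
  simp only [pvDMatch, decide_eq_true_eq] at h1 h2
  have := h1.2.2.symm.trans h2.2.2
  exact String.ext this

theorem pvIsJanFirst_excl_false (d y1 y2 : String) (hne : y1 ≠ y2) (h : pvIsJanFirst d y1 = true) :
    pvIsJanFirst d y2 = false := by
  cases hh : pvIsJanFirst d y2
  · rfl
  · exact absurd (pvIsJanFirst_excl h hh) hne

def mkD (a b c : Int) : PySem.Dict String Int := PySem.Dict.mk [("2017", a), ("2016", b), ("2015", c)]

def stepY (year : String) (a : Int) (p : Int × String) : Int :=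
  if pvIsJanFirst p.2 year && a == 0 then p.1 else a

def stepA (di : PySem.Dict String Int) (p : Int × String) : PySem.Dict String Int :=
  if PySem.Str.slice p.2 (some 0) (some 2) == "01" && PySem.Str.slice p.2 (some 3) (some 5) == "01"
      && PySem.Str.slice p.2 (some 6) none == "2017" && di.getD "2017" 0 == 0 then
    di.insert "2017" p.1
  else if PySem.Str.slice p.2 (some 0) (some 2) == "01" && PySem.Str.slice p.2 (some 3) (some 5) == "01"
      && PySem.Str.slice p.2 (some 6) none == "2016" && di.getD "2016" 0 == 0 then
    di.insert "2016" p.1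
  else if PySem.Str.slice p.2 (some 0) (some 2) == "01" && PySem.Str.slice p.2 (some 3) (some 5) == "01"
      && PySem.Str.slice p.2 (some 6) none == "2015" && di.getD "2015" 0 == 0 then
    di.insert "2015" p.1
  else di

theorem stepA_mkD (a b c : Int) (p : Int × String) :
    stepA (mkD a b c) p = mkD (stepY "2017" a p) (stepY "2016" b p) (stepY "2015" c p) := by
  have h17 : (mkD a b c).getD "2017" 0 = a := rfl
  have h16 : (mkD a b c).getD "2016" 0 = b := rfl
  have h15 : (mkD a b c).getD "2015" 0 = c := rfl
  have i17 : (mkD a b c).insert "2017" p.1 = mkD p.1 b c := rfl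
  have i16 : (mkD a b c).insert "2016" p.1 = mkD a p.1 c := rfl
  have i15 : (mkD a b c).insert "2015" p.1 = mkD a b p.1 := rfl
  unfold stepA stepY
  rw [h17, h16, h15]
  by_cases m17 : pvIsJanFirst p.2 "2017" = true
  · have m16 := pvIsJanFirst_excl_false p.2 "2017" "2016" (by decide) m17
    have m15 := pvIsJanFirst_excl_false p.2 "2017" "2015" (by decide) m17
    have m17u := m17; have m16u := m16; have m15u := m15
    simp only [pvIsJanFirst] at m17u m16u m15u
    simp only [m17, m16, m15, m17u, m16u, m15u, Bool.true_and, Bool.false_and]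
    by_cases ha : (a == 0) = true <;> simp [ha, i17]
  · simp only [Bool.not_eq_true] at m17
    by_cases m16 : pvIsJanFirst p.2 "2016" = true
    · have m15 := pvIsJanFirst_excl_false p.2 "2016" "2015" (by decide) m16
      have m17u := m17; have m16u := m16; have m15u := m15
      simp only [pvIsJanFirst] at m17u m16u m15u
      simp only [m17, m16, m15, m17u, m16u, m15u, Bool.true_and, Bool.false_and]
      by_cases hb : (b == 0) = true <;> simp [hb, i16]
    · simp only [Bool.not_eq_true] at m16
      by_cases m15 : pvIsJanFirst p.2 "2015" = true
      · have m17u := m17; have m16u := m16; have m15u := m15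
        simp only [pvIsJanFirst] at m17u m16u m15u
        simp only [m17, m16, m15, m17u, m16u, m15u, Bool.true_and, Bool.false_and]
        by_cases hc : (c == 0) = true <;> simp [hc, i15]
      · simp only [Bool.not_eq_true] at m15
        have m17u := m17; have m16u := m16; have m15u := m15
        simp only [pvIsJanFirst] at m17u m16u m15u
        simp [m17u, m16u, m15u, m17, m16, m15]

theorem foldA_mkD (l : List (Int × String)) (a b c : Int) :
    l.foldl stepA (mkD a b c)
      = mkD (l.foldl (stepY "2017") a) (l.foldl (stepY "2016") b) (l.foldl (stepY "2015") c) := by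
  induction l generalizing a b c with
  | nil => rfl
  | cons p t ih => simp only [List.foldl_cons, stepA_mkD, ih]

theorem foldY_of_ne (year : String) (l : List (Int × String)) (a : Int) (h : a ≠ 0) :
    l.foldl (stepY year) a = a := by
  induction l with
  | nil => rfl
  | cons p t ih => simpa [stepY, h] using ih

-- B's per-year value
def bVal (year : String) (l : List (Int × String)) : Int :=
  (((l.find? (fun p => pvIsJanFirst p.2 year)).map (fun p => p.1)).getD 0)

theorem find?_cons_eq (k : Int) (d : String) (t : List (Int × String)) (year : String) :
    List.find? (fun p => pvIsJanFirst p.2 year) ((k, d) :: t)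
      = if pvIsJanFirst d year then some (k, d) else List.find? (fun p => pvIsJanFirst p.2 year) t := by
  cases hh : pvIsJanFirst d year <;> simp [hh]

theorem foldY_enum (year : String) (dates : List String) (k : Int) (hk : 1 ≤ k) :
    (PySem.List.enumerate dates k).foldl (stepY year) 0 = bVal year (PySem.List.enumerate dates k) := by
  induction dates generalizing k with
  | nil => rfl
  | cons d t ih =>
    rw [PySem.List.enumerate_cons]
    by_cases hm : pvIsJanFirst d year = true
    · rw [List.foldl_cons, show stepY year 0 (k, d) = k by simp [stepY, hm],
        foldY_of_ne year _ k (by omega)]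
      simp only [bVal]
      rw [find?_cons_eq, if_pos hm]
      rfl
    · rw [List.foldl_cons, show stepY year 0 (k, d) = 0 by simp [stepY, hm],
        ih (k + 1) (by omega)]
      simp only [bVal]
      rw [find?_cons_eq, if_neg hm]

theorem find?_enum_eq_none_iff (year : String) (t : List String) (k : Int) :
    (PySem.List.enumerate t k).find? (fun p => pvIsJanFirst p.2 year) = none
      ↔ ∀ d ∈ t, pvIsJanFirst d year = false := by
  induction t generalizing k with
  | nil => simp [PySem.List.enumerate_nil]
  | cons d t ih =>
    rw [PySem.List.enumerate_cons]
    by_cases hm : pvIsJanFirst d year = true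
    · rw [find?_cons_eq, if_pos hm]
      simp [hm]
    · rw [find?_cons_eq, if_neg hm]
      rw [ih (k + 1)]
      constructor
      · intro hall d' hd'
        rcases List.mem_cons.1 hd' with rfl | hd2
        · simpa using hm
        · exact hall d' hd2
      · intro hall d' hd'
        exact hall d' (List.mem_cons_of_mem _ hd')

-- the per-crypto inner computations of the two ports
def innerA (dates : List String) : List (String × Int) :=
  ((PySem.List.enumerate dates 0).foldl stepA
    (((PySem.Dict.empty.insert "2017" 0).insert "2016" 0).insert "2015" 0)).items

def innerB (dates : List String) : List (String × Int) :=
  ((["2017", "2016", "2015"].foldl (fun di year =>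
      di.insert year
        ((((PySem.List.enumerate dates 0).find? (fun p => pvIsJanFirst p.2 year)).map (fun p => p.1)).getD 0))
    PySem.Dict.empty)).items

theorem innerA_eq (dates : List String) :
    innerA dates
      = [("2017", (PySem.List.enumerate dates 0).foldl (stepY "2017") 0),
         ("2016", (PySem.List.enumerate dates 0).foldl (stepY "2016") 0),
         ("2015", (PySem.List.enumerate dates 0).foldl (stepY "2015") 0)] := by
  have h0 : (((PySem.Dict.empty.insert "2017" (0:Int)).insert "2016" 0).insert "2015" 0) = mkD 0 0 0 := rfl
  rw [innerA, h0, foldA_mkD]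
  rfl

theorem innerB_eq (dates : List String) :
    innerB dates
      = [("2017", bVal "2017" (PySem.List.enumerate dates 0)),
         ("2016", bVal "2016" (PySem.List.enumerate dates 0)),
         ("2015", bVal "2015" (PySem.List.enumerate dates 0))] := rfl

-- A's port unfolded into a map of innerA
theorem portA_eq_map (xs : List (List String)) :
    index_of_first_of_the_year xs = xs.map innerA := by
  have h1 : index_of_first_of_the_year xs
      = (PySem.List.pyRange 0 (xs.length : Int) 1).foldl
          (fun acc j => acc ++ [innerA (PySem.List.pyGetD xs j [])]) [] := rfl
  exact h1.trans ((PySem.List.foldl_pyRange_zero_pyGetD' xs ([] : List String)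
      (fun acc dates => acc ++ [innerA dates]) []).trans
    ((PySem.List.foldl_append_singleton_eq_map innerA xs []).trans (List.nil_append _)))

theorem portB_eq_map (xs : List (List String)) :
    index_of_first_of_the_year_alt xs = xs.map innerB := by
  exact (PySem.List.foldl_append_singleton_eq_map innerB xs []).trans (List.nil_append _)

-- the per-year scalar agreement, outside the per-list change condition
theorem inner_year_eq (dates : List String) (year : String)
    (h : ¬ (dates.head?.any (fun d => pvDMatch d year) = true ∧ dates.tail.any (fun d => pvDMatch d year) = true)) :
    (PySem.List.enumerate dates 0).foldl (stepY year) 0 = bVal year (PySem.List.enumerate dates 0) := by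
  cases dates with
  | nil => rfl
  | cons d t =>
    simp only [List.head?_cons, List.tail_cons, Option.any_some, pvDMatch_eq, List.any_eq_true,
      not_and, not_exists] at h
    rw [PySem.List.enumerate_cons, List.foldl_cons,
      show stepY year 0 (0, d) = 0 by simp [stepY],
      show (0:Int) + 1 = 1 by norm_num, foldY_enum year t 1 (by omega)]
    by_cases hm : pvIsJanFirst d year = true
    · have hnone : (PySem.List.enumerate t 1).find? (fun p => pvIsJanFirst p.2 year) = none := by
        rw [find?_enum_eq_none_iff]
        intro d' hd'
        cases hh : pvIsJanFirst d' year
        · rfl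
        · exact absurd hh (by simpa using h hm d' hd')
      simp only [bVal, hnone]
      rw [find?_cons_eq, if_pos hm]
      rfl
    · simp only [bVal]
      rw [find?_cons_eq, if_neg hm]

theorem inner_eq (dates : List String)
    (h : ∀ year ∈ (["2017", "2016", "2015"] : List String),
      ¬ (dates.head?.any (fun d => pvDMatch d year) = true ∧ dates.tail.any (fun d => pvDMatch d year) = true)) :
    innerA dates = innerB dates := by
  rw [innerA_eq, innerB_eq]
  rw [inner_year_eq dates "2017" (h _ (by decide)), inner_year_eq dates "2016" (h _ (by decide)),
    inner_year_eq dates "2015" (h _ (by decide))]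

-- tightness helpers: inside the change condition the two inner values differ at the matched year
theorem bVal_enum_zero_of_head (d : String) (t : List String) (year : String)
    (hm : pvIsJanFirst d year = true) :
    bVal year (PySem.List.enumerate (d :: t) 0) = 0 := by
  rw [PySem.List.enumerate_cons]
  simp only [bVal]
  rw [find?_cons_eq, if_pos hm]
  rfl

theorem foldY_pos_of_match (d : String) (t : List String) (year : String)
    (ht : t.any (fun d' => pvIsJanFirst d' year) = true) :
    0 < (PySem.List.enumerate (d :: t) 0).foldl (stepY year) 0 := by
  rw [PySem.List.enumerate_cons, List.foldl_cons,
    show stepY year 0 (0, d) = 0 by simp [stepY],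
    show (0:Int) + 1 = 1 by norm_num, foldY_enum year t 1 (by omega)]
  obtain ⟨d', hd', hm'⟩ := List.any_eq_true.1 ht
  rcases ho : (PySem.List.enumerate t 1).find? (fun p => pvIsJanFirst p.2 year) with _ | p
  · exact absurd ((find?_enum_eq_none_iff year t 1).1 ho d' hd') (by simp [hm'])
  · have hmem : p ∈ PySem.List.enumerate t 1 := List.mem_of_find?_eq_some ho
    have hfst : 1 ≤ p.1 := by
      have hmap : p.1 ∈ (PySem.List.enumerate t 1).map (fun q => q.1) :=
        List.mem_map_of_mem hmem
      rw [PySem.List.map_fst_enumerate] at hmap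
      exact (PySem.List.mem_pyRange_one.1 hmap).1
    rw [bVal, ho]
    simpa using hfst

theorem inner_ne (dates : List String)
    (h : ∃ year ∈ (["2017", "2016", "2015"] : List String),
      dates.head?.any (fun d => pvDMatch d year) = true ∧ dates.tail.any (fun d => pvDMatch d year) = true) :
    innerA dates ≠ innerB dates := by
  obtain ⟨year, hy, hhead, htail⟩ := h
  cases dates with
  | nil => simp at hhead
  | cons d t =>
    simp only [List.head?_cons, Option.any_some, pvDMatch_eq] at hhead
    have htail' : t.any (fun d' => pvIsJanFirst d' year) = true := by
      simpa only [List.tail_cons, pvDMatch_eq] using htail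
    have hA := foldY_pos_of_match d t year htail'
    have hB := bVal_enum_zero_of_head d t year hhead
    rw [innerA_eq, innerB_eq]
    intro heq
    fin_cases hy <;>
      · simp only [List.cons.injEq, Prod.mk.injEq, true_and, and_true] at heq
        omega

-- ===== VERDICT (by name: the statement is the Claim_ definition above) =====
theorem index_of_first_of_the_year_spec : Claim_unchanged_index_of_first_of_the_year := by
  intro xs _ hnd
  rw [portA_eq_map, portB_eq_map]
  apply List.map_congr_left
  intro dates hdates
  exact inner_eq dates (fun year hy hc => hnd ⟨dates, hdates, year, hy, by simp [hc.1, hc.2]⟩)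

theorem index_of_first_of_the_year_changed : Claim_changed_index_of_first_of_the_year := by
  unfold Claim_changed_index_of_first_of_the_year; decide

theorem index_of_first_of_the_year_tight : Claim_exact_index_of_first_of_the_year := by
  intro xs _ hd
  obtain ⟨dates, hdates, year, hy, hb⟩ := hd
  simp only [Bool.and_eq_true] at hb
  rw [portA_eq_map, portB_eq_map]
  intro heq
  exact inner_ne dates ⟨year, hy, hb.1, hb.2⟩ ((List.map_eq_map_iff.1 heq) dates hdates)
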